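-- pv_equiv track=rewrite | github.com/surzioarmani/python_for_codingTest | dp/11726.py | solution
-- ===== SOURCE A (Python) =====
-- def solution(n):
--
--     dp = [ 0 for _ in range(n+1)]
--
--     for i in range(n+1):
--         if ( i < 4):
--             dp[i] = i
--
--         else:
--             dp[i] = dp[i-1] + (dp[i-2] * 2)
--
--     return dp[n]%10007
-- ===== SOURCE B (Python) =====
-- def solution(n):
--     # Closed form: dp[i] = (5*2^(i-2) + (-1)^i) / 3 for i >= 2, so modular
--     # exponentiation gives dp[n] % 10007 in O(log n); 3336 is 3^{-1} mod 10007.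
--     if n < 2:
--         return n
--     sign = 1 if n % 2 == 0 else -1
--     return (5 * pow(2, n - 2, 10007) + sign) * 3336 % 10007
-- ===== Notes on version B (the rewrite author's own statement) =====
-- stated objective: faster
-- what changed: Replaced the O(n) dp-table loop with the closed form dp[n] = (5*2^(n-2) + (-1)^n)/3 evaluated via modular exponentiation mod 10007 (3336 = inverse of 3 mod 10007).
import Mathlib
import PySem

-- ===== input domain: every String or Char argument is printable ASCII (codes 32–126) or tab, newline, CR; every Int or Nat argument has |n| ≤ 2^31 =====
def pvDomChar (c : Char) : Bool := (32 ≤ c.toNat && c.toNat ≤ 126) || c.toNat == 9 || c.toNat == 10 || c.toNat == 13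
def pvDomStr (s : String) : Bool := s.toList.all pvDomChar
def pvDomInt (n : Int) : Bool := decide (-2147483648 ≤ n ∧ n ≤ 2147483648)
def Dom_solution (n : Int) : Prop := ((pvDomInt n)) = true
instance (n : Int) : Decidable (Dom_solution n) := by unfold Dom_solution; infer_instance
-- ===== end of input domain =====

-- B replaces A's O(n) dp-table loop by the closed form dp[i] = (5*2^(i-2) + (-1)^i)/3
-- evaluated with modular exponentiation mod 10007 (3336 = 3⁻¹ mod 10007): O(log n).

-- ===== PORT A =====
def solution (n : Int) : Int :=
  let dp := (PySem.List.pyRange 0 (n+1) 1).map (fun _ => (0:Int))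
  let dp := (PySem.List.pyRange 0 (n+1) 1).foldl
    (fun dp i =>
      if i < 4 then PySem.List.pySetD dp i i
      else PySem.List.pySetD dp i
        (PySem.List.pyGetD dp (i-1) 0 + PySem.List.pyGetD dp (i-2) 0 * 2)) dp
  PySem.Int.mod (PySem.List.pyGetD dp n 0) 10007

-- ===== PORT B =====
def solution_alt (n : Int) : Int :=
  if n < 2 then n
  else
    let sign : Int := if PySem.Int.mod n 2 = 0 then 1 else -1
    PySem.Int.mod ((5 * PySem.Int.powMod 2 (n - 2).toNat 10007 + sign) * 3336) 10007

-- ===== PRECONDITION & SPEC =====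
-- A raises IndexError (dp[n] on the empty list) for every n < 0, so Pre_ is exactly n ≥ 0.
def Pre_solution (n : Int) : Prop := 0 ≤ n
instance (n : Int) : Decidable (Pre_solution n) := by unfold Pre_solution; infer_instance
def pvWitness_solution : Int := 7
def Spec_solution (n : Int) (out : Int) : Prop := out = solution_alt n
instance (n : Int) (out : Int) : Decidable (Spec_solution n out) := by unfold Spec_solution; infer_instance

-- ===== CLAIM (what is proved, stated in full; the proofs are below) =====
def Claim_equal_solution : Prop := ∀ (n : Int), Dom_solution n → Pre_solution n → Spec_solution n (solution n)

-- ===== LEMMAS AND PROOFS =====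

-- Mathematical recurrence computed by A's dp table.
def pvG : Nat → Int
  | 0 => 0
  | 1 => 1
  | 2 => 2
  | 3 => 3
  | (i+4) => pvG (i+3) + pvG (i+2) * 2

-- Loop invariant: folding A's body over range(k, L) completes the table to pvG.
lemma pvLoop (L : Nat) : ∀ (d k : Nat) (dp : List Int), k + d = L → dp.length = L →
    (∀ j, j < k → dp.getD j 0 = pvG j) →
    (((PySem.List.pyRange (k:Int) (L:Int) 1).foldl
      (fun dp i =>
        if i < 4 then PySem.List.pySetD dp i i
        else PySem.List.pySetD dp i
          (PySem.List.pyGetD dp (i-1) 0 + PySem.List.pyGetD dp (i-2) 0 * 2)) dp).length = L ∧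
     ∀ j, j < L → ((PySem.List.pyRange (k:Int) (L:Int) 1).foldl
      (fun dp i =>
        if i < 4 then PySem.List.pySetD dp i i
        else PySem.List.pySetD dp i
          (PySem.List.pyGetD dp (i-1) 0 + PySem.List.pyGetD dp (i-2) 0 * 2)) dp).getD j 0 = pvG j) := by
  intro d
  induction d with
  | zero =>
    intro k dp hk hlen hpre
    have hk' : k = L := by omega
    subst hk'
    rw [PySem.List.pyRange_one_eq_nil le_rfl]
    exact ⟨hlen, fun j hj => hpre j hj⟩
  | succ d ih =>
    intro k dp hk hlen hpre
    have hkL : (k:Int) < (L:Int) := by exact_mod_cast (by omega : k < L)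
    rw [PySem.List.pyRange_one_cons hkL]
    simp only [List.foldl_cons]
    -- the updated table after step k
    have hkl : k < dp.length := by omega
    have hset : ∀ v : Int, (PySem.List.pySetD dp (k:Int) v) = dp.set k v := by
      intro v; simp [PySem.List.pySetD_natCast]
    have hstep :
        (if (k:Int) < 4 then PySem.List.pySetD dp (k:Int) (k:Int)
         else PySem.List.pySetD dp (k:Int)
           (PySem.List.pyGetD dp ((k:Int)-1) 0 + PySem.List.pyGetD dp ((k:Int)-2) 0 * 2))
        = dp.set k (pvG k) := by
      by_cases h4 : k < 4
      · rw [if_pos (by exact_mod_cast h4), hset]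
        interval_cases k <;> rfl
      · rw [if_neg (by exact_mod_cast h4), hset]
        obtain ⟨i, rfl⟩ : ∃ i, k = i + 4 := ⟨k - 4, by omega⟩
        have h1 : ((i:Int) + 4 - 1) = ((i + 3 : Nat) : Int) := by push_cast; ring
        have h2 : ((i:Int) + 4 - 2) = ((i + 2 : Nat) : Int) := by push_cast; ring
        have e1 : PySem.List.pyGetD dp ((↑(i+4):Int) - 1) 0 = pvG (i+3) := by
          rw [show ((↑(i+4):Int) - 1) = ((i + 3 : Nat) : Int) by push_cast; ring,
              PySem.List.pyGetD_natCast]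
          exact hpre (i+3) (by omega)
        have e2 : PySem.List.pyGetD dp ((↑(i+4):Int) - 2) 0 = pvG (i+2) := by
          rw [show ((↑(i+4):Int) - 2) = ((i + 2 : Nat) : Int) by push_cast; ring,
              PySem.List.pyGetD_natCast]
          exact hpre (i+2) (by omega)
        rw [e1, e2]
        rfl
    rw [hstep]
    have hcast : ((k:Int) + 1) = ((k+1 : Nat) : Int) := by push_cast; ring
    rw [hcast]
    apply ih (k+1) (dp.set k (pvG k)) (by omega) (by simp [hlen])
    intro j hj
    rcases Nat.lt_or_ge j k with hjk | hjk
    · rw [List.getD_eq_getElem?_getD, List.getElem?_set_ne (by omega)]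
      rw [← List.getD_eq_getElem?_getD]
      exact hpre j hjk
    · have hjeq : j = k := by omega
      subst hjeq
      rw [List.getD_eq_getElem?_getD, List.getElem?_set_self (by omega)]
      rfl

-- A computes pvG n.toNat reduced mod 10007.
lemma solution_eq_pvG (N : Nat) : solution (N : Int) = pvG N % 10007 := by
  simp only [solution]
  rw [show ((N:Int) + 1) = ((N + 1 : Nat) : Int) from by push_cast; ring]
  have key := pvLoop (N+1) (N+1) 0
    ((PySem.List.pyRange ((0:Nat):Int) ((N+1:Nat):Int) 1).map (fun _ => (0:Int)))
    (by omega)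
    (by simp [PySem.List.length_pyRange_one])
    (fun j hj => absurd hj (by omega))
  simp only [Nat.cast_zero] at key
  obtain ⟨-, hval⟩ := key
  rw [PySem.List.pyGetD_natCast, hval N (by omega)]
  exact PySem.Int.mod_eq_emod_of_pos (by norm_num)

-- Closed form: 3 * pvG (m+2) = 5 * 2^m + (-1)^m.
lemma pvG_closed (m : Nat) : 3 * pvG (m+2) = 5 * 2^m + (-1:Int)^m := by
  induction m using Nat.strong_induction_on with
  | _ m ih =>
    match m with
    | 0 => decide
    | 1 => decide
    | (m+2) =>
      have h1 := ih (m+1) (by omega)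
      have h0 := ih m (by omega)
      show 3 * (pvG (m+3) + pvG (m+2) * 2) = 5 * 2^(m+2) + (-1:Int)^(m+2)
      have : 3 * pvG (m+3) + (3 * pvG (m+2)) * 2
          = (5 * 2^(m+1) + (-1:Int)^(m+1)) + (5 * 2^m + (-1:Int)^m) * 2 := by
        rw [h1, h0]
      calc 3 * (pvG (m+3) + pvG (m+2) * 2)
          = 3 * pvG (m+3) + (3 * pvG (m+2)) * 2 := by ring
        _ = (5 * 2^(m+1) + (-1:Int)^(m+1)) + (5 * 2^m + (-1:Int)^m) * 2 := this
        _ = 5 * 2^(m+2) + (-1:Int)^(m+2) := by ring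

-- Modular step: from 3v = w deduce v ≡ w * 3336 (mod 10007).
lemma pvModStep (v w : Int) (h : 3 * v = w) : v % 10007 = (w * 3336) % 10007 := by
  have : (10007:Int) ∣ (w * 3336 - v) := by
    have : w * 3336 - v = v * 10007 := by rw [← h]; ring
    rw [this]
    exact ⟨v, by ring⟩
  have hmod : v ≡ w * 3336 [ZMOD 10007] := (Int.modEq_iff_dvd.mpr this)
  exact hmod

theorem pv_main (n : Int) (hn : 0 ≤ n) : solution n = solution_alt n := by
  obtain ⟨N, rfl⟩ : ∃ M : Nat, n = (M : Int) := ⟨n.toNat, (Int.toNat_of_nonneg hn).symm⟩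
  rw [solution_eq_pvG N]
  unfold solution_alt
  by_cases h2 : (N:Int) < 2
  · rw [if_pos h2]
    have hN2 : N < 2 := by exact_mod_cast h2
    interval_cases N <;> decide
  · rw [if_neg h2]
    obtain ⟨m, rfl⟩ : ∃ m : Nat, N = m + 2 := ⟨N - 2, by omega⟩
    have hexp : ((↑(m+2):Int) - 2).toNat = m := by push_cast; omega
    rw [hexp]
    have hmod2 : PySem.Int.mod (↑(m+2):Int) 2 = (↑(m+2):Int) % 2 :=
      PySem.Int.mod_eq_emod_of_pos (by norm_num)
    have hsign : (if PySem.Int.mod (↑(m+2):Int) 2 = 0 then (1:Int) else -1) = (-1:Int)^m := by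
      rw [hmod2]
      rcases Nat.even_or_odd m with he | ho
      · obtain ⟨t, rfl⟩ := he
        rw [if_pos (by push_cast; omega), Even.neg_one_pow ⟨t, rfl⟩]
      · obtain ⟨t, rfl⟩ := ho
        rw [if_neg (by push_cast; omega), Odd.neg_one_pow ⟨t, rfl⟩]
    rw [hsign]
    have hpw : PySem.Int.powMod 2 m 10007 = (2:Int)^m % 10007 := by
      unfold PySem.Int.powMod
      exact PySem.Int.mod_eq_emod_of_pos (by norm_num)
    rw [hpw, PySem.Int.mod_eq_emod_of_pos (by norm_num : (0:Int) < 10007)]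
    -- chain of congruences mod 10007
    have h1 : ((5 * ((2:Int)^m % 10007) + (-1:Int)^m) * 3336)
        ≡ ((5 * (2:Int)^m + (-1:Int)^m) * 3336) [ZMOD 10007] := by
      have : ((2:Int)^m % 10007) ≡ (2:Int)^m [ZMOD 10007] := Int.emod_emod_of_dvd _ dvd_rfl
      exact (((this.mul_left 5).add_right _).mul_right 3336)
    have h2' : pvG (m+2) % 10007 = ((5 * (2:Int)^m + (-1:Int)^m) * 3336) % 10007 :=
      pvModStep _ _ (pvG_closed m)
    rw [h2', h1.symm]

-- ===== VERDICT (by name: the statement is the Claim_ definition above) =====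
theorem solution_spec : Claim_equal_solution := by
  intro n _ hpre
  show solution n = solution_alt n
  exact pv_main n hpre
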